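-- pv_equiv track=rewrite | github.com/JoeWang-0519/JoeWang-0519 | 苏州大学本科毕业设计/intelligent_warehouse.py | appoint
-- ===== SOURCE A (Python) =====
-- def appoint(mission, carall):
--     car_id = -1
--     min_dis = 99999
--     start = [0, 0]
--     end = [0, 0]
--     if mission[0] <= 3:
--         start[0] = 7*mission[0]
--         start[1] = 0
--         if mission[1] <= 3:
--             end[0] = 7 * mission[1] + 2
--             end[1] = 3
--         elif mission[1] <= 6:
--             end[0] = 7 * (mission[1] - 3) + 2
--             end[1] = 7
--         elif mission[1] <= 9:
--             end[0] = 7 * (mission[1] - 6) + 2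
--             end[1] = 11
--         elif mission[1] <= 12:
--             end[0] = 7 * (mission[1] - 9) + 2
--             end[1] = 15
--     else:
--         end[0] = 7*(mission[0] - 3)
--         end[1] = 19
--         if mission[1] <= 3:
--             start[0] = 7 * mission[1] + 2
--             start[1] = 3
--         elif mission[1] <= 6:
--             start[0] = 7 * (mission[1] - 3) + 2
--             start[1] = 7
--         elif mission[1] <= 9:
--             start[0] = 7 * (mission[1] - 6) + 2
--             start[1] = 11
--         elif mission[1] <= 12:
--             start[0] = 7 * (mission[1] - 9) + 2
--             start[1] = 15
--     for i in range(len(carall)):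
--         if carall[i][3] == 0 and carall[i][2] >= 30 and carall[i][10] == 0:
--
--             dis = (carall[i][0]-start[0])**2 + (carall[i][1]-start[1])**2
--             if dis < min_dis:
--                 min_dis = dis
--                 car_id = i
--     if car_id != -1:
--         carall[car_id][4], carall[car_id][5] = start[0], start[1]
--         carall[car_id][6], carall[car_id][7] = end[0], end[1]
--     return car_id
-- ===== SOURCE B (Python) =====
-- def appoint(mission, carall):
--     m0, m1 = mission[0], mission[1]
--     # closed-form grid cell for the shelf coordinate m1
--     if m1 <= 12:
--         band = max(0, (m1 - 1) // 3)
--         cell = (7 * (m1 - 3 * band) + 2, 3 + 4 * band)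
--     else:
--         cell = (0, 0)
--     if m0 <= 3:
--         start, end = (7 * m0, 0), cell
--     else:
--         start, end = cell, (7 * (m0 - 3), 19)
--     cand = [((c[0] - start[0]) ** 2 + (c[1] - start[1]) ** 2, i)
--             for i, c in enumerate(carall)
--             if c[3] == 0 and c[2] >= 30 and c[10] == 0]
--     if not cand:
--         return -1
--     order = sorted(cand, key=lambda t: t[0])
--     car_id = order[0][1]
--     carall[car_id][4:8] = [start[0], start[1], end[0], end[1]]
--     return car_id
-- ===== Notes on version B (the rewrite author's own statement) =====
-- stated objective: simpler
-- what changed: The duplicated four-way elif ladder over mission[1] becomes one closed-form grid-cell computation, and the stateful running-min index loop becomes: build the eligible (distance, index) candidate list, stable-sort it by distance, take the first element.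
-- intended difference: When at least one eligible car exists but every eligible car is at squared distance >= 99999 from the start, A returns -1 because its min_dis is initialised to the pseudo-infinity 99999, while B assigns the nearest eligible car; distances in the intended 21x19 warehouse grid are tiny, so 99999 is clearly an infinity initialiser and assigning the nearest car is the intended behaviour. — e.g. on appoint([1, 2], [[1000, 0, 30, 0, 0, 0, 0, 0, 0, 0, 0]]): A returns -1, B returns 0
import Mathlib
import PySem

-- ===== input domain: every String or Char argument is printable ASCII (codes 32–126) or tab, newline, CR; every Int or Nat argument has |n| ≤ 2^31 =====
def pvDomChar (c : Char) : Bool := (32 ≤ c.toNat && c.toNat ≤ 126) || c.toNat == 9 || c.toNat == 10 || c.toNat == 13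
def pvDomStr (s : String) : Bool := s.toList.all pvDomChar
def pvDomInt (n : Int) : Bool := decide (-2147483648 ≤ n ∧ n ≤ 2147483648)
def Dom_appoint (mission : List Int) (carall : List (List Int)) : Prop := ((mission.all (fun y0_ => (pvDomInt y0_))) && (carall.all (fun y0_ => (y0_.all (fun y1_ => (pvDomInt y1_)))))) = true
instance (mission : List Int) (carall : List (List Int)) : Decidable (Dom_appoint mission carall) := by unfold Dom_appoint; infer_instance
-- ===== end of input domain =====

-- B replaces A's duplicated four-way elif ladder by one closed-form grid-cell computation and A's
-- stateful running-min index loop by "build the eligible (distance, index) candidates, stable-sort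
-- by distance, take the first" (objective: simpler).  Both Pythons mutate carall[car_id] in place
-- identically wherever they pick the same car; the equivalence proved here is about the RETURN
-- value only.  On inputs where every eligible car is ≥ 99999 away (D_ below) B assigns the nearest
-- car where A's pseudo-infinity initialiser makes it return -1.

-- ===== PORT A =====
-- loop body of A's for-loop: state (car_id, min_dis), one (index, row) pair
def pvStepA (start : Int × Int) (s : Int × Int) (p : Int × List Int) : Int × Int :=
  if PySem.List.pyGetD p.2 3 0 = 0 ∧ PySem.List.pyGetD p.2 2 0 ≥ 30 ∧ PySem.List.pyGetD p.2 10 0 = 0 then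
    let dis := (PySem.List.pyGetD p.2 0 0 - start.1)^2 + (PySem.List.pyGetD p.2 1 0 - start.2)^2
    if dis < s.2 then (p.1, dis) else s
  else s

-- A's start/end block over mission[0], mission[1] (the four-way elif ladder), as a helper
def pvStartA (m0 m1 : Int) : Int × Int :=
  if m0 ≤ 3 then (7*m0, 0)
  else
    if m1 ≤ 3 then (7*m1+2, 3)
    else if m1 ≤ 6 then (7*(m1-3)+2, 7)
    else if m1 ≤ 9 then (7*(m1-6)+2, 11)
    else if m1 ≤ 12 then (7*(m1-9)+2, 15)
    else (0, 0)

-- transliteration of A; mission[i] / carall[i][j] are ported with pyGetD (exact under Pre_appoint,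
-- which admits exactly the inputs where the Python indexing never raises)
def appoint (mission : List Int) (carall : List (List Int)) : Int :=
  let m0 := PySem.List.pyGetD mission 0 0
  let m1 := PySem.List.pyGetD mission 1 0
  let start : Int × Int := pvStartA m0 m1
  let s := (PySem.List.pyRange 0 (PySem.List.len carall) 1).foldl
    (fun s j => pvStepA start s (j, PySem.List.pyGetD carall j [])) (-1, 99999)
  s.1

-- ===== PORT B =====
-- closed-form grid cell for mission[1]
def pvCellB (m1 : Int) : Int × Int :=
  if m1 ≤ 12 then
    let band := max 0 (PySem.Int.floordiv (m1 - 1) 3)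
    (7*(m1 - 3*band) + 2, 3 + 4*band)
  else (0, 0)

-- one candidate (dis, index) from one (index, row) pair of enumerate(carall)
def pvCandF (start : Int × Int) (p : Int × List Int) : Option (Int × Int) :=
  if PySem.List.pyGetD p.2 3 0 = 0 ∧ PySem.List.pyGetD p.2 2 0 ≥ 30 ∧ PySem.List.pyGetD p.2 10 0 = 0 then
    some ((PySem.List.pyGetD p.2 0 0 - start.1)^2 + (PySem.List.pyGetD p.2 1 0 - start.2)^2, p.1)
  else none

-- "if not cand: return -1; order = sorted(cand, key=t[0]); return order[0][1]"
def appoint_alt (mission : List Int) (carall : List (List Int)) : Int :=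
  let m0 := PySem.List.pyGetD mission 0 0
  let m1 := PySem.List.pyGetD mission 1 0
  let start : Int × Int := if m0 ≤ 3 then (7*m0, 0) else pvCellB m1
  let cand := (PySem.List.enumerate carall 0).filterMap (pvCandF start)
  if cand.isEmpty then -1
  else ((PySem.List.sorted cand (fun t => t.1) false).headD (0, -1)).2

-- ===== PRECONDITION & SPEC =====
-- exactly the inputs where Python A returns: mission[1] must exist, and every row survives the
-- short-circuit condition carall[i][3]==0 and carall[i][2]>=30 and carall[i][10]==0
def Pre_appoint (mission : List Int) (carall : List (List Int)) : Prop :=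
  2 ≤ mission.length ∧
    ∀ c ∈ carall, 4 ≤ c.length ∧ (c.getD 3 0 = 0 → 30 ≤ c.getD 2 0 → 11 ≤ c.length)
instance (mission : List Int) (carall : List (List Int)) : Decidable (Pre_appoint mission carall) := by
  unfold Pre_appoint; infer_instance

def pvWitness_appoint : List Int × List (List Int) :=
  ([1, 2], [[0, 0, 30, 0, 0, 0, 0, 0, 0, 0, 0]])

-- When at least one eligible car exists but every eligible car is at squared distance ≥ 99999 from
-- the start, A returns -1 (its min_dis starts at the pseudo-infinity 99999) while B assigns the
-- nearest eligible car; distances on the intended 21×19 grid are tiny, so B's value is the intended one.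
def pvEligD (c : List Int) : Prop := c.getD 3 0 = 0 ∧ 30 ≤ c.getD 2 0 ∧ c.getD 10 0 = 0

def D_appoint (mission : List Int) (carall : List (List Int)) : Prop :=
  let s := pvStartA (mission.getD 0 0) (mission.getD 1 0)
  (∃ c ∈ carall, pvEligD c) ∧
    ∀ c ∈ carall, pvEligD c → 99999 ≤ (c.getD 0 0 - s.1) ^ 2 + (c.getD 1 0 - s.2) ^ 2
instance (mission : List Int) (carall : List (List Int)) : Decidable (D_appoint mission carall) := by
  unfold D_appoint pvEligD; infer_instance

def Spec_appoint (mission : List Int) (carall : List (List Int)) (out : Int) : Prop :=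
  ¬ D_appoint mission carall → out = appoint_alt mission carall
instance (mission : List Int) (carall : List (List Int)) (out : Int) : Decidable (Spec_appoint mission carall out) := by
  unfold Spec_appoint; infer_instance

def pvDiffWitness_appoint : List Int × List (List Int) :=
  ([1, 2], [[1000, 0, 30, 0, 0, 0, 0, 0, 0, 0, 0]])
def pvDiffWitnessOut_appoint : Int × Int := (-1, 0)

-- ===== CLAIM (what is proved, stated in full; the proofs are below) =====
def Claim_unchanged_appoint : Prop := ∀ (mission : List Int) (carall : List (List Int)), Dom_appoint mission carall → Pre_appoint mission carall → Spec_appoint mission carall (appoint mission carall)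
def Claim_changed_appoint : Prop := Dom_appoint (pvDiffWitness_appoint.1) (pvDiffWitness_appoint.2) ∧ Pre_appoint (pvDiffWitness_appoint.1) (pvDiffWitness_appoint.2) ∧ D_appoint (pvDiffWitness_appoint.1) (pvDiffWitness_appoint.2) ∧ appoint (pvDiffWitness_appoint.1) (pvDiffWitness_appoint.2) = pvDiffWitnessOut_appoint.1 ∧ appoint_alt (pvDiffWitness_appoint.1) (pvDiffWitness_appoint.2) = pvDiffWitnessOut_appoint.2 ∧ pvDiffWitnessOut_appoint.1 ≠ pvDiffWitnessOut_appoint.2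
def Claim_exact_appoint : Prop := ∀ (mission : List Int) (carall : List (List Int)), Dom_appoint mission carall → Pre_appoint mission carall → D_appoint mission carall → appoint mission carall ≠ appoint_alt mission carall

-- ===== LEMMAS AND PROOFS =====

-- shared notation for the proofs: the start point both ports compute
def pvStart (mission : List Int) : Int × Int :=
  if PySem.List.pyGetD mission 0 0 ≤ 3 then (7 * PySem.List.pyGetD mission 0 0, 0)
  else pvCellB (PySem.List.pyGetD mission 1 0)

-- the candidate list both proofs talk about
def pvCand (mission : List Int) (carall : List (List Int)) : List (Int × Int) :=
  (PySem.List.enumerate carall 0).filterMap (pvCandF (pvStart mission))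

-- the first-wins running minimum on the first component
def pvF (m x : Int × Int) : Int × Int := if x.1 < m.1 then x else m

-- A's elif ladder equals B's closed-form cell
lemma pvCell_eq (m1 : Int) :
    (if m1 ≤ 3 then ((7*m1+2 : Int), (3 : Int))
     else if m1 ≤ 6 then (7*(m1-3)+2, 7)
     else if m1 ≤ 9 then (7*(m1-6)+2, 11)
     else if m1 ≤ 12 then (7*(m1-9)+2, 15)
     else (0, 0)) = pvCellB m1 := by
  unfold pvCellB
  rw [PySem.Int.floordiv_eq_ediv_of_pos (by norm_num)]
  split_ifs with h1 h2 h3 h4 <;> try omega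
  · have hq : max 0 ((m1-1)/3) = 0 := max_eq_left (by omega)
    simp only [hq, Prod.mk.injEq]; constructor <;> ring
  · have h : (m1-1)/3 = 1 := by omega
    have hq : max 0 ((m1-1)/3) = 1 := by rw [h]; norm_num
    simp only [hq, Prod.mk.injEq]; constructor <;> ring
  · have h : (m1-1)/3 = 2 := by omega
    have hq : max 0 ((m1-1)/3) = 2 := by rw [h]; norm_num
    simp only [hq, Prod.mk.injEq]; constructor <;> ring
  · have h : (m1-1)/3 = 3 := by omega
    have hq : max 0 ((m1-1)/3) = 3 := by rw [h]; norm_num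
    simp only [hq, Prod.mk.injEq]; constructor <;> ring
  · rfl

-- A's start helper computes the shared start
lemma pvStartA_eq (mission : List Int) :
    pvStartA (PySem.List.pyGetD mission 0 0) (PySem.List.pyGetD mission 1 0) = pvStart mission := by
  unfold pvStartA pvStart
  by_cases h : PySem.List.pyGetD mission 0 0 ≤ 3
  · simp [h]
  · simp only [if_neg h]
    exact pvCell_eq _

-- a foldl whose body filters is a foldl over the filterMap
lemma pvFoldl_stepA (start : Int × Int) (l : List (Int × List Int)) (s0 : Int × Int) :
    l.foldl (pvStepA start) s0
      = (l.filterMap (pvCandF start)).foldl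
          (fun s t => if t.1 < s.2 then (t.2, t.1) else s) s0 := by
  induction l generalizing s0 with
  | nil => rfl
  | cons p l ih =>
      have hstep : pvStepA start s0 p
          = match pvCandF start p with
            | some t => if t.1 < s0.2 then (t.2, t.1) else s0
            | none => s0 := by
        unfold pvStepA pvCandF; split_ifs <;> rfl
      cases hc : pvCandF start p with
      | none => simp [List.foldl_cons, hc, hstep, ih]
      | some t => simp [List.foldl_cons, hc, hstep, ih]

-- A's (car_id, min_dis) fold is the swap of the (min_dis, car_id) fold
lemma pvFold_swap (l : List (Int × Int)) (s : Int × Int) :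
    l.foldl (fun s t => if t.1 < s.2 then (t.2, t.1) else s) s
      = Prod.swap (l.foldl pvF s.swap) := by
  induction l generalizing s with
  | nil => rfl
  | cons q l ih =>
      have h : (if q.1 < s.2 then (q.2, q.1) else s).swap = pvF s.swap q := by
        unfold pvF; by_cases hq : q.1 < s.2 <;> simp [hq]
      simp only [List.foldl_cons, ih, ← h]

-- A's return value, in terms of the candidate list
lemma pvAppointA (mission : List Int) (carall : List (List Int)) :
    appoint mission carall = ((pvCand mission carall).foldl pvF (99999, -1)).2 := by
  simp only [appoint]
  rw [pvStartA_eq]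
  have h1 : (PySem.List.pyRange 0 (PySem.List.len carall) 1).foldl
      (fun s j => pvStepA (pvStart mission) s (j, PySem.List.pyGetD carall j [])) (-1, 99999)
      = (PySem.List.enumerate carall 0).foldl (pvStepA (pvStart mission)) (-1, 99999) := by
    rw [PySem.List.enumerate_eq_map_pyRange carall ([] : List Int), List.foldl_map]
  rw [h1, pvFoldl_stepA, pvFold_swap]
  rfl

-- head of an insertion-sort fold is the first-wins running minimum
lemma pvIns_head (xs : List (Int × Int)) :
    ∀ (h : Int × Int) (t : List (Int × Int)), ∃ t',
      xs.foldl (fun acc x => PySem.List.insertBy (fun a b => decide (a.1 < b.1)) x acc) (h :: t)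
        = (xs.foldl pvF h) :: t' := by
  induction xs with
  | nil => intro h t; exact ⟨t, rfl⟩
  | cons x xs ih =>
      intro h t
      by_cases hx : x.1 < h.1
      · have : PySem.List.insertBy (fun a b => decide (a.1 < b.1)) x (h :: t) = x :: h :: t := by
          simp [PySem.List.insertBy, hx]
        rw [List.foldl_cons, this]
        have hf : pvF h x = x := by simp [pvF, hx]
        simpa [hf] using ih x (h :: t)
      · have : PySem.List.insertBy (fun a b => decide (a.1 < b.1)) x (h :: t)
            = h :: PySem.List.insertBy (fun a b => decide (a.1 < b.1)) x t := by
          simp [PySem.List.insertBy, hx]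
        rw [List.foldl_cons, this]
        have hf : pvF h x = h := by simp [pvF, hx]
        simpa [hf] using ih h _
      -- cases exhaust x.1 < h.1

-- B's return value, in terms of the candidate list
lemma pvAppointB (mission : List Int) (carall : List (List Int)) :
    appoint_alt mission carall
      = (match pvCand mission carall with
         | [] => (-1 : Int)
         | h :: t => (t.foldl pvF h).2) := by
  simp only [appoint_alt]
  show (if (pvCand mission carall).isEmpty then (-1:Int)
    else ((PySem.List.sorted (pvCand mission carall) (fun t => t.1) false).headD (0, -1)).2) = _
  cases hc : pvCand mission carall with
  | nil => rfl
  | cons h t =>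
      simp only [List.isEmpty_cons, Bool.false_eq_true, if_false]
      rw [PySem.List.sorted_eq_foldl_insertBy]
      rw [List.foldl_cons]
      have : PySem.List.insertBy (fun a b => decide (a.1 < b.1)) h ([] : List (Int × Int)) = [h] := by
        simp [PySem.List.insertBy]
      rw [this]
      obtain ⟨t', ht'⟩ := pvIns_head t h []
      rw [ht']
      rfl

-- eligibility of a row, as D_ states it
def pvElig (c : List Int) : Prop :=
  PySem.List.pyGetD c 3 0 = 0 ∧ 30 ≤ PySem.List.pyGetD c 2 0 ∧ PySem.List.pyGetD c 10 0 = 0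

def pvDis (s : Int × Int) (c : List Int) : Int :=
  (PySem.List.pyGetD c 0 0 - s.1)^2 + (PySem.List.pyGetD c 1 0 - s.2)^2

-- D_ in terms of the shared start
lemma pvD_iff (mission : List Int) (carall : List (List Int)) :
    D_appoint mission carall ↔
      (∃ c ∈ carall, pvElig c) ∧
        ∀ c ∈ carall, pvElig c → 99999 ≤ pvDis (pvStart mission) c := by
  have h0 : mission.getD 0 0 = PySem.List.pyGetD mission 0 0 := by
    simp [PySem.List.pyGetD_ofNat', List.getD_eq_getElem?_getD]
  have h1 : mission.getD 1 0 = PySem.List.pyGetD mission 1 0 := by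
    simp [PySem.List.pyGetD_ofNat', List.getD_eq_getElem?_getD]
  unfold D_appoint pvEligD pvElig pvDis
  rw [h0, h1, pvStartA_eq]
  simp only [PySem.List.pyGetD_ofNat', List.getD_eq_getElem?_getD]

-- membership in the candidate list
lemma pvMem_cand (mission : List Int) (carall : List (List Int)) (x : Int × Int) :
    x ∈ pvCand mission carall →
      ∃ c ∈ carall, pvElig c ∧ x.1 = pvDis (pvStart mission) c ∧ 0 ≤ x.2 := by
  intro hx
  rcases List.mem_filterMap.mp hx with ⟨p, hp, hfp⟩
  rcases (PySem.List.mem_enumerate_iff _ _ _).mp hp with ⟨k, hk, rfl⟩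
  unfold pvCandF at hfp
  split_ifs at hfp with he
  cases hfp
  exact ⟨carall[k], List.getElem_mem hk, ⟨he.1, he.2.1, he.2.2⟩, rfl, by simp⟩

lemma pvCand_of_mem (mission : List Int) (carall : List (List Int)) (c : List Int)
    (hc : c ∈ carall) (he : pvElig c) :
    ∃ x ∈ pvCand mission carall, x.1 = pvDis (pvStart mission) c := by
  rcases List.mem_iff_getElem.mp hc with ⟨k, hk, rfl⟩
  refine ⟨(pvDis (pvStart mission) carall[k], (k : Int)), ?_, rfl⟩
  apply List.mem_filterMap.mpr
  refine ⟨((k : Int), carall[k]), ?_, ?_⟩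
  · exact (PySem.List.mem_enumerate_iff _ _ _).mpr ⟨k, hk, by simp⟩
  · unfold pvCandF pvDis
    rw [if_pos ⟨he.1, he.2.1, he.2.2⟩]

-- a first-wins minimum started far away ignores which far seed it was started from
lemma pvSeed_irrel (l : List (Int × Int)) :
    ∀ (a b : Int × Int), 99999 ≤ a.1 → 99999 ≤ b.1 →
      (∃ x ∈ l, x.1 < 99999) → l.foldl pvF a = l.foldl pvF b := by
  induction l with
  | nil => intro a b _ _ hx; simp at hx
  | cons q l ih =>
      intro a b ha hb hx
      by_cases hq : q.1 < 99999
      · have h1 : pvF a q = q := by unfold pvF; rw [if_pos (by omega)]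
        have h2 : pvF b q = q := by unfold pvF; rw [if_pos (by omega)]
        simp only [List.foldl_cons, h1, h2]
      · have h1 : 99999 ≤ (pvF a q).1 := by unfold pvF; split_ifs <;> omega
        have h2 : 99999 ≤ (pvF b q).1 := by unfold pvF; split_ifs <;> omega
        have hx' : ∃ x ∈ l, x.1 < 99999 := by
          rcases hx with ⟨x, hxm, hxlt⟩
          rcases List.mem_cons.mp hxm with rfl | hxl
          · omega
          · exact ⟨x, hxl, hxlt⟩
        simp only [List.foldl_cons]
        exact ih _ _ h1 h2 hx'

-- if every candidate is far, the fold never leaves the seed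
lemma pvFold_far (l : List (Int × Int)) (hfar : ∀ x ∈ l, 99999 ≤ x.1) :
    l.foldl pvF (99999, -1) = (99999, -1) := by
  induction l with
  | nil => rfl
  | cons q l ih =>
      have hq : pvF (99999, -1) q = (99999, -1) := by
        unfold pvF
        rw [if_neg (by have := hfar q (by simp); simp; omega)]
      simp only [List.foldl_cons, hq]
      exact ih (fun x hx => hfar x (by simp [hx]))

-- the fold result keeps any property all inputs have
lemma pvFold_prop (P : Int × Int → Prop) (l : List (Int × Int)) :
    ∀ h, P h → (∀ x ∈ l, P x) → P (l.foldl pvF h) := by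
  induction l with
  | nil => intro h hh _; exact hh
  | cons q l ih =>
      intro h hh hl
      simp only [List.foldl_cons]
      refine ih (pvF h q) ?_ (fun x hx => hl x (by simp [hx]))
      unfold pvF; split_ifs
      · exact hl q (by simp)
      · exact hh

-- the two ports agree outside D_
lemma pvAgree (mission : List Int) (carall : List (List Int))
    (hD : ¬ D_appoint mission carall) :
    appoint mission carall = appoint_alt mission carall := by
  rw [pvAppointA, pvAppointB]
  rw [pvD_iff] at hD
  cases hc : pvCand mission carall with
  | nil => rfl
  | cons h t =>
      have hex : ∃ x ∈ pvCand mission carall, x.1 < 99999 := by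
        by_contra hno
        push Not at hno
        apply hD
        constructor
        · rcases pvMem_cand mission carall h (by rw [hc]; simp) with ⟨c, hcm, he, _⟩
          exact ⟨c, hcm, he⟩
        · intro c hcm he
          by_contra hlt
          push Not at hlt
          obtain ⟨x, hxm, hxe⟩ := pvCand_of_mem mission carall c hcm he
          have := hno x hxm; omega
      rw [hc] at hex
      simp only [List.foldl_cons]
      by_cases hh : h.1 < 99999
      · have : pvF (99999, -1) h = h := by unfold pvF; rw [if_pos (by omega)]
        rw [this]
      · have h1 : pvF (99999, -1) h = (99999, -1) := by
          unfold pvF; rw [if_neg (by omega)]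
        rw [h1]
        have hex' : ∃ x ∈ t, x.1 < 99999 := by
          rcases hex with ⟨x, hxm, hxlt⟩
          rcases List.mem_cons.mp hxm with rfl | hxl
          · omega
          · exact ⟨x, hxl, hxlt⟩
        rw [pvSeed_irrel t (99999, -1) h (by norm_num) (by omega) hex']

-- ===== VERDICT (by name: the statements are the Claim_ definitions above) =====
theorem appoint_spec : Claim_unchanged_appoint := by
  intro mission carall _ _
  unfold Spec_appoint
  intro hD
  exact pvAgree mission carall hD

theorem appoint_changed : Claim_changed_appoint := by
  unfold Claim_changed_appoint; decide

theorem appoint_tight : Claim_exact_appoint := by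
  intro mission carall _ _ hD
  rw [pvAppointA, pvAppointB]
  rw [pvD_iff] at hD
  obtain ⟨⟨c, hcm, he⟩, hfar⟩ := hD
  have hcand : ∃ x ∈ pvCand mission carall, True := by
    obtain ⟨x, hxm, -⟩ := pvCand_of_mem mission carall c hcm he
    exact ⟨x, hxm, trivial⟩
  cases hc : pvCand mission carall with
  | nil => rw [hc] at hcand; simp at hcand
  | cons h t =>
      have hfarx : ∀ x ∈ pvCand mission carall, 99999 ≤ x.1 := by
        intro x hx
        rcases pvMem_cand mission carall x hx with ⟨c', hcm', he', hx1, _⟩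
        rw [hx1]; exact hfar c' hcm' he'
      have hA : ((h :: t).foldl pvF (99999, -1)).2 = -1 := by
        rw [pvFold_far (h :: t) (fun x hx => hfarx x (by rw [hc]; exact hx))]
      have hB : 0 ≤ (t.foldl pvF h).2 := by
        refine pvFold_prop (fun x => 0 ≤ x.2) t h ?_ ?_
        · obtain ⟨-, -, -, -, h0⟩ := pvMem_cand mission carall h (by rw [hc]; simp)
          exact h0
        · intro x hx
          obtain ⟨-, -, -, -, h0⟩ := pvMem_cand mission carall x (by rw [hc]; simp [hx])
          exact h0
      rw [hA]
      show (-1 : Int) ≠ (t.foldl pvF h).2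
      omega
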